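-- pv_equiv track=rewrite | github.com/dna-storage/framed | dnastorage/primer/design.py | get
-- ===== SOURCE A (Python) =====
-- def get(v):
--     l=''
--     value=v
--     for i in range(19,-1,-1):
--         if(value>=3*4**i):
--           l += "T"
--           value-=3*4**i
--         elif(value>=2*4**i):
--           l += "C"
--           value-=2*4**i
--         elif(value>=1*4**i):
--           l += "G"
--           value-=1*4**i
--         else:
--           l += "A"
--     #print value
--     # print l
--     return l
-- ===== SOURCE B (Python) =====
-- def get(v):
--     # Non-negative values are encoded by repeated divmod (LSB first), then reversed.
--     # Negative values encode like 0 (all 'A'), matching the reference's clamping.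
--     value = max(v, 0)
--     digits = []
--     for _ in range(20):
--         value, d = divmod(value, 4)
--         digits.append("AGCT"[d])
--     return ''.join(reversed(digits))
-- ===== Notes on version B (the rewrite author's own statement) =====
-- stated objective: alternative
-- what changed: Replaces the MSB-first four-way comparison/subtraction cascade with LSB-first repeated divmod digit extraction into a list that is reversed at the end (negatives clamp to 0, matching A on the domain).
import Mathlib
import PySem

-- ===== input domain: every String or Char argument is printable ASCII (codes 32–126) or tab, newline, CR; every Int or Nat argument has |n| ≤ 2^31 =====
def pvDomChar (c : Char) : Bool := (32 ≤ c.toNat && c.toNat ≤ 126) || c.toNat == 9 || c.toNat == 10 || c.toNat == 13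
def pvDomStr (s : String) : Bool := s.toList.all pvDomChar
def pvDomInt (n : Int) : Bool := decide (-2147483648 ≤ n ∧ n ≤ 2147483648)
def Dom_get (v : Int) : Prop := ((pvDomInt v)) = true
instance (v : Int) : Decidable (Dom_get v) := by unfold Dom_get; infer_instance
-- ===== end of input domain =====

-- B replaces A's MSB-first comparison/subtraction cascade with LSB-first divmod digit
-- extraction followed by a reversal (alternative decomposition, same cost).

-- ===== PORT A =====
-- one iteration of A's for-loop body: state = (l, value), index i (from range(19,-1,-1))
def getStep (st : List Char × Int) (i : Int) : List Char × Int :=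
  let p : Int := 4 ^ i.toNat      -- 4**i; i ≥ 0 for every i the range yields
  if st.2 ≥ 3 * p then (st.1 ++ ['T'], st.2 - 3 * p)
  else if st.2 ≥ 2 * p then (st.1 ++ ['C'], st.2 - 2 * p)
  else if st.2 ≥ 1 * p then (st.1 ++ ['G'], st.2 - 1 * p)
  else (st.1 ++ ['A'], st.2)

def get (v : Int) : String :=
  String.mk ((PySem.List.pyRange 19 (-1) (-1)).foldl getStep ([], v)).1

-- ===== PORT B =====
-- "AGCT"[d]: hand port, exact for d ∈ {0,1,2,3} (the only values divmod(·,4) yields)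
def altChar (d : Int) : Char :=
  if d = 0 then 'A' else if d = 1 then 'G' else if d = 2 then 'C' else 'T'

-- one iteration of B's loop: value, d = divmod(value, 4); digits.append("AGCT"[d])
def altStep (st : Int × List Char) (_ : Nat) : Int × List Char :=
  (PySem.Int.floordiv st.1 4, st.2 ++ [altChar (PySem.Int.mod st.1 4)])

def get_alt (v : Int) : String :=
  String.mk ((List.range 20).foldl altStep (max v 0, [])).2.reverse

-- ===== PRECONDITION & SPEC =====
def Spec_get (v : Int) (out : String) : Prop := out = get_alt v
instance (v : Int) (out : String) : Decidable (Spec_get v out) := by unfold Spec_get; infer_instance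

-- ===== CLAIM (what is proved, stated in full; the proofs are below) =====
def Claim_equal_get : Prop := ∀ (v : Int), Dom_get v → Spec_get v (get v)

-- ===== LEMMAS AND PROOFS =====

-- the LSB-first digit list B's loop produces from value w in n iterations
def altDigits : Int → Nat → List Char
  | _, 0 => []
  | w, n + 1 => altChar (w % 4) :: altDigits (w / 4) n

lemma altStep_foldl (xs : List Nat) : ∀ (w : Int) (ds : List Char),
    (xs.foldl altStep (w, ds)).2 = ds ++ altDigits w xs.length := by
  induction xs with
  | nil => intro w ds; simp [altDigits]
  | cons x xs ih =>
      intro w ds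
      simp only [List.foldl_cons, altStep, List.length_cons, altDigits,
        PySem.Int.floordiv_eq_ediv_of_pos (show (0:Int) < 4 by norm_num),
        PySem.Int.mod_eq_emod_of_pos (show (0:Int) < 4 by norm_num)]
      rw [ih]
      simp

lemma get_alt_eq (v : Int) :
    get_alt v = String.mk (altDigits (max v 0) 20).reverse := by
  unfold get_alt
  rw [show ((List.range 20).foldl altStep (max v 0, [])).2
      = [] ++ altDigits (max v 0) (List.range 20).length from altStep_foldl _ _ _]
  simp

-- the index list [n-1, …, 0] that A's range(19,-1,-1) is an instance of
def R (n : Nat) : List Int := (List.range n).reverse.map Int.ofNat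

lemma R_succ (n : Nat) : R (n + 1) = (n : Int) :: R n := by
  simp [R, List.range_succ]

lemma altDigits_zero (n : Nat) : altDigits 0 n = List.replicate n 'A' := by
  induction n with
  | zero => rfl
  | succ n ih => simp [altDigits, ih, altChar, List.replicate_succ]

lemma altDigits_split (n : Nat) : ∀ w : Int, 0 ≤ w → w < 4 ^ (n + 1) →
    altDigits w (n + 1) = altDigits (w % 4 ^ n) n ++ [altChar (w / 4 ^ n)] := by
  induction n with
  | zero =>
      intro w h0 h1
      have hw : w % 4 = w := Int.emod_eq_of_lt h0 (by simpa using h1)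
      simp [altDigits, hw]
  | succ n ih =>
      intro w h0 h1
      have h4 : (0:Int) < 4 := by norm_num
      have hq0 : 0 ≤ w / 4 := Int.ediv_nonneg h0 (by norm_num)
      have hq1 : w / 4 < 4 ^ (n + 1) := by
        rw [Int.ediv_lt_iff_lt_mul h4]
        calc w < 4 ^ (n + 2) := h1
          _ = 4 ^ (n + 1) * 4 := by ring
      have key := ih (w / 4) hq0 hq1
      -- the three divmod commutations
      have hc : w / 4 / 4 ^ n = w / 4 ^ (n + 1) := by
        rw [Int.ediv_ediv_of_nonneg (by positivity : (0:Int) ≤ 4)]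
        ring_nf
      have ha : (w % 4 ^ (n + 1)) % 4 = w % 4 := by
        exact Int.emod_emod_of_dvd w (dvd_pow_self 4 (Nat.succ_ne_zero n))
      have hb : (w % 4 ^ (n + 1)) / 4 = w / 4 % 4 ^ n := by
        have hdef : w % 4 ^ (n + 1) = w - 4 ^ (n + 1) * (w / 4 ^ (n + 1)) := Int.emod_def w _
        have : w - 4 ^ (n + 1) * (w / 4 ^ (n + 1)) = (w / 4 % 4 ^ n) * 4 + w % 4 := by
          have e1 : w / 4 % 4 ^ n = w / 4 - 4 ^ n * (w / 4 / 4 ^ n) := Int.emod_def _ _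
          have e2 : w % 4 = w - 4 * (w / 4) := Int.emod_def w 4
          rw [e1, e2, hc]
          ring
        rw [hdef, this]
        have hm0 : 0 ≤ w % 4 := Int.emod_nonneg w (by norm_num)
        have hm1 : w % 4 < 4 := Int.emod_lt_of_pos w h4
        omega
      conv_lhs => rw [show altDigits w (n + 1 + 1) = altChar (w % 4) :: altDigits (w / 4) (n + 1) from rfl, key]
      simp [altDigits, ha, hb, hc]

lemma foldA_neg (n : Nat) : ∀ (w : Int) (l : List Char), w < 0 →
    (R n).foldl getStep (l, w) = (l ++ List.replicate n 'A', w) := by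
  induction n with
  | zero => intro w l _; simp [R]
  | succ n ih =>
      intro w l hw
      rw [R_succ, List.foldl_cons]
      have hp : (0:Int) < 4 ^ n := by positivity
      have step : getStep (l, w) (n : Int) = (l ++ ['A'], w) := by
        unfold getStep
        simp only [ge_iff_le, Int.toNat_natCast]
        rw [if_neg (by omega), if_neg (by omega), if_neg (by omega)]
      rw [step, ih _ _ hw]
      simp [List.replicate_succ]

lemma foldA (n : Nat) : ∀ (w : Int) (l : List Char), 0 ≤ w → w < 4 ^ n →
    (R n).foldl getStep (l, w) = (l ++ (altDigits w n).reverse, 0) := by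
  induction n with
  | zero =>
      intro w l h0 h1
      have : w = 0 := by omega
      simp [R, this, altDigits]
  | succ n ih =>
      intro w l h0 h1
      rw [R_succ, List.foldl_cons]
      have hp : (0:Int) < 4 ^ n := by positivity
      set d : Int := w / 4 ^ n with hd
      have hd0 : 0 ≤ d := Int.ediv_nonneg h0 (le_of_lt hp)
      have hd3 : d < 4 := by
        rw [hd, Int.ediv_lt_iff_lt_mul hp]
        calc w < 4 ^ (n + 1) := h1
          _ = 4 * 4 ^ n := by ring
      have hdge : ∀ k : Int, (k * 4 ^ n ≤ w ↔ k ≤ d) := by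
        intro k
        rw [hd, Int.le_ediv_iff_mul_le hp]
      have hrem : w - d * 4 ^ n = w % 4 ^ n := by
        rw [hd, Int.emod_def]; ring
      have hr0 : 0 ≤ w % 4 ^ n := Int.emod_nonneg w (ne_of_gt hp)
      have hr1 : w % 4 ^ n < 4 ^ n := Int.emod_lt_of_pos w hp
      have hcast : ((n : Int)).toNat = n := by simp
      have step : getStep (l, w) (n : Int) = (l ++ [altChar d], w % 4 ^ n) := by
        unfold getStep
        simp only [ge_iff_le, hcast]
        interval_cases d
        · rw [if_neg (by rw [hdge]; omega), if_neg (by rw [hdge]; omega),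
            if_neg (by rw [hdge]; omega)]
          have : w = w % 4 ^ n := by omega
          simp [altChar, ← this]
        · rw [if_neg (by rw [hdge]; omega), if_neg (by rw [hdge]; omega),
            if_pos (by rw [hdge])]
          simp [altChar]; omega
        · rw [if_neg (by rw [hdge]; omega), if_pos (by rw [hdge])]
          simp [altChar]; omega
        · rw [if_pos (by rw [hdge])]
          simp [altChar]; omega
      rw [step, ih _ _ hr0 hr1, altDigits_split n w h0 h1]
      simp [hd]

lemma pyRange_eq_R : PySem.List.pyRange 19 (-1) (-1) = R 20 := by decide

-- ===== VERDICT (by name: the statement is the Claim_ definition above) =====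
theorem get_spec : Claim_equal_get := by
  intro v hdom
  unfold Spec_get _root_.get
  rw [pyRange_eq_R, get_alt_eq]
  rcases lt_or_ge v 0 with hv | hv
  · rw [foldA_neg 20 v [] hv]
    have : max v 0 = 0 := by omega
    simp [this, altDigits_zero]
  · have hb : v < 4 ^ 20 := by
      have : v ≤ 2147483648 := by
        unfold Dom_get pvDomInt at hdom
        simpa using of_decide_eq_true hdom |>.2
      calc v ≤ 2147483648 := this
        _ < 4 ^ 20 := by norm_num
    rw [foldA 20 v [] hv hb]
    have : max v 0 = v := by omega
    simp [this]
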